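-- pv_equiv track=rewrite | github.com/carbonscott/pyrotein | examples/loaddata.py | name_to_code
-- ===== SOURCE A (Python) =====
-- def name_to_code(spec_dict, name = "C"):
--     name_to_code_dict = {}
--     for k, v in spec_dict.items():
--         if not name in v: continue
--
--         k_new = v[name]
--         v_new = k
--
--         if not k_new in name_to_code_dict: name_to_code_dict[k_new] = v_new
--         else: name_to_code_dict[k_new] += f" | {v_new}"
--
--     return name_to_code_dict
-- ===== SOURCE B (Python) =====
-- def name_to_code(spec_dict, name="C"):
--     # stage 1: flatten to (code, key) pairs; stage 2: for each distinct code
--     # (first-occurrence order) rescan the pairs and join its keys.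
--     pairs = [(v[name], k) for k, v in spec_dict.items() if name in v]
--     result = {}
--     for code, _ in pairs:
--         if code not in result:
--             result[code] = " | ".join(k for c, k in pairs if c == code)
--     return result
-- ===== Notes on version B (the rewrite author's own statement) =====
-- stated objective: alternative
-- what changed: Replaces A's single-pass dict accumulation (first-time insert vs string append) with a two-stage algorithm: flatten spec_dict to a flat (code,key) pair list, then for each distinct code in first-occurrence order rescan the whole pair list and join its keys with ' | '.
import Mathlib
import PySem

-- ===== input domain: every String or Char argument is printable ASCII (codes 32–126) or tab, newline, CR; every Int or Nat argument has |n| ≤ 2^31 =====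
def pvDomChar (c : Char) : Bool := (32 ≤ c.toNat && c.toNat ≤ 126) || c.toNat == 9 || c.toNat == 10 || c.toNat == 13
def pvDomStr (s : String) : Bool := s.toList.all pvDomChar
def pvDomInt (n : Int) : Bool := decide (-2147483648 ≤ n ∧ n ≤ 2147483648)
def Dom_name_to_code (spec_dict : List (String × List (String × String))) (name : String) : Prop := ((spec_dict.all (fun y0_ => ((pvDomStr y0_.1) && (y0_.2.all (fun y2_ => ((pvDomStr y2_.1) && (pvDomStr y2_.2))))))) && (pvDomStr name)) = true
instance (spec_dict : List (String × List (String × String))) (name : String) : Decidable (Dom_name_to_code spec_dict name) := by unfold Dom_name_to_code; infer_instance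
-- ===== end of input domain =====

-- B replaces A's single-pass dict accumulation with a two-stage algorithm: flatten to a flat
-- (code, key) pair list, then for each distinct code (first-occurrence order) rescan the pairs
-- and join its keys with ' | ': an alternative decomposition, same result.

-- ===== PORT A =====
-- A's loop body: skip when name not in v, else insert on first sight, append ' | {k}' otherwise.
def name_to_code_step (name : String) (acc : PySem.Dict String String)
    (kv : String × List (String × String)) : PySem.Dict String String :=
  match (PySem.Dict.mk kv.2).get? name with
  | none => acc
  | some kNew =>
      if acc.contains kNew = false then acc.insert kNew kv.1
      else acc.modify kNew "" (fun s => s ++ " | " ++ kv.1)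

def name_to_code (spec_dict : List (String × List (String × String))) (name : String) : List (String × String) :=
  (spec_dict.foldl (name_to_code_step name) PySem.Dict.empty).items

-- ===== PORT B =====
-- stage 1: pairs = [(v[name], k) for k, v in spec_dict.items() if name in v]
def name_to_code_pairs (spec_dict : List (String × List (String × String))) (name : String) : List (String × String) :=
  spec_dict.filterMap (fun kv => ((PySem.Dict.mk kv.2).get? name).map (fun code => (code, kv.1)))

-- stage 2: for each (code, _) in pairs, if unseen, rescan pairs and join that code's keys.
def name_to_code_pick (pairs : List (String × String)) (acc : PySem.Dict String String)
    (p : String × String) : PySem.Dict String String :=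
  if acc.contains p.1 then acc
  else acc.insert p.1 (PySem.Str.join " | " ((pairs.filter (fun q => q.1 == p.1)).map (fun q => q.2)))

def name_to_code_alt (spec_dict : List (String × List (String × String))) (name : String) : List (String × String) :=
  let pairs := name_to_code_pairs spec_dict name
  (pairs.foldl (name_to_code_pick pairs) PySem.Dict.empty).items

-- ===== PRECONDITION & SPEC =====
def Spec_name_to_code (spec_dict : List (String × List (String × String))) (name : String) (out : List (String × String)) : Prop := out = name_to_code_alt spec_dict name
instance (spec_dict : List (String × List (String × String))) (name : String) (out : List (String × String)) : Decidable (Spec_name_to_code spec_dict name out) := by unfold Spec_name_to_code; infer_instance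

-- ===== CLAIM (what is proved, stated in full; the proofs are below) =====
def Claim_equal_name_to_code : Prop := ∀ (spec_dict : List (String × List (String × String))) (name : String), Dom_name_to_code spec_dict name → Spec_name_to_code spec_dict name (name_to_code spec_dict name)

-- ===== LEMMAS AND PROOFS =====

-- A's loop body seen on a single (code, key) pair
def pvStepA (acc : PySem.Dict String String) (p : String × String) : PySem.Dict String String :=
  if acc.contains p.1 = false then acc.insert p.1 p.2
  else acc.modify p.1 "" (fun s => s ++ " | " ++ p.2)

-- the string A's appends accumulate for the keys of a code beyond the first
def pvExtL (ks : List String) : String := ks.foldr (fun k s => " | " ++ (k ++ s)) ""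

def pvExt (suf : List (String × String)) (c : String) : String :=
  pvExtL ((suf.filter (fun p => p.1 == c)).map (fun p => p.2))

theorem pvFoldA (name : String) (spec_dict : List (String × List (String × String)))
    (d : PySem.Dict String String) :
    spec_dict.foldl (name_to_code_step name) d
      = (name_to_code_pairs spec_dict name).foldl pvStepA d := by
  induction spec_dict generalizing d with
  | nil => rfl
  | cons kv rest ih =>
      simp only [List.foldl_cons, name_to_code_pairs, List.filterMap_cons]
      cases h : (PySem.Dict.mk kv.2).get? name with
      | none => simpa [name_to_code_step, h, name_to_code_pairs] using ih _
      | some code => simpa [name_to_code_step, h, pvStepA, name_to_code_pairs] using ih _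

theorem pvJoinCons (k : String) (rest : List String) :
    PySem.Str.join " | " (k :: rest) = k ++ pvExtL rest := by
  induction rest generalizing k with
  | nil => apply String.toList_inj.mp; simp [PySem.Str.toList_join, PySem.Chars.join_singleton, pvExtL]
  | cons r rest' ih =>
      apply String.toList_inj.mp
      have h := congrArg String.toList (ih r)
      simp only [PySem.Str.toList_join, List.map_cons, PySem.Chars.join_cons_cons,
        String.toList_append, pvExtL, List.foldr_cons] at h ⊢
      rw [show (" | " : String).toList = [' ', '|', ' '] from rfl] at h ⊢
      simp [h]

theorem pvContains_map (l : List (String × String)) (f : String × String → String) (c : String) :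
    (PySem.Dict.mk (l.map (fun q => (q.1, f q)))).contains c = (PySem.Dict.mk l).contains c := by
  simp [PySem.Dict.contains, List.any_map, Function.comp_def]

theorem pvMain (ps : List (String × String)) :
    ∀ (suf : List (String × String)) (accA : PySem.Dict String String),
    accA.keys.Nodup →
    (∀ c, accA.contains c = false →
      ps.filter (fun p => p.1 == c) = suf.filter (fun p => p.1 == c)) →
    (suf.foldl pvStepA accA).items
      = (suf.foldl (name_to_code_pick ps)
          (PySem.Dict.mk (accA.items.map (fun q => (q.1, q.2 ++ pvExt suf q.1))))).items := by
  intro suf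
  induction suf with
  | nil =>
      intro accA _ _
      simp [pvExt, pvExtL]
  | cons p suf' ih =>
      intro accA hnd hfil
      have hcont : ∀ f : String × String → String,
          (PySem.Dict.mk (accA.items.map (fun q => (q.1, f q)))).contains p.1
            = accA.contains p.1 := fun f => pvContains_map accA.items f p.1
      simp only [List.foldl_cons]
      by_cases hc : accA.contains p.1 = true
      · -- key already present: A appends to the stored string, B skips the pair
        have hBskip : name_to_code_pick ps
            (PySem.Dict.mk (accA.items.map (fun q => (q.1, q.2 ++ pvExt (p :: suf') q.1)))) p
            = PySem.Dict.mk (accA.items.map (fun q => (q.1, q.2 ++ pvExt (p :: suf') q.1))) := by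
          simp [name_to_code_pick, hcont, hc]
        rw [hBskip]
        have hstep : pvStepA accA p = accA.modify p.1 "" (fun s => s ++ " | " ++ p.2) := by
          simp [pvStepA, hc]
        rw [hstep]
        have hitems : (accA.modify p.1 "" (fun s => s ++ " | " ++ p.2)).items
            = accA.items.map (fun q =>
                if q.1 == p.1 then (p.1, accA.getD p.1 "" ++ " | " ++ p.2) else q) := by
          unfold PySem.Dict.modify
          exact PySem.Dict.items_insert_of_contains _ _ hc
        have hmapeq :
            (accA.modify p.1 "" (fun s => s ++ " | " ++ p.2)).items.map
                (fun q => (q.1, q.2 ++ pvExt suf' q.1))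
              = accA.items.map (fun q => (q.1, q.2 ++ pvExt (p :: suf') q.1)) := by
          rw [hitems, List.map_map]
          apply List.map_congr_left
          intro q hq
          by_cases hqp : q.1 == p.1
          · have hq1 : q.1 = p.1 := eq_of_beq hqp
            have hgd : accA.getD q.1 "" = q.2 :=
              PySem.Dict.getD_of_mem_items accA (by simpa using hq) hnd ""
            have hps : (p.1 == q.1) = true := by rw [hq1]; exact beq_self_eq_true p.1
            simp [pvExt, pvExtL, hq1, ← hgd, String.append_assoc]
          · have hne : ¬ q.1 = p.1 := fun h => hqp (by simp [h])
            have hps : (p.1 == q.1) = false := by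
              simp only [beq_eq_false_iff_ne]
              exact fun h => hne h.symm
            simp [hne, pvExt, hps]
        have := ih (accA.modify p.1 "" (fun s => s ++ " | " ++ p.2))
          (by
            rw [PySem.Dict.keys_modify]
            exact PySem.Dict.nodup_keys_insert _ _ _ hnd)
          (by
            intro c' hc'
            rw [PySem.Dict.contains_modify] at hc'
            simp only [Bool.or_eq_false_iff, beq_eq_false_iff_ne] at hc'
            rw [hfil c' hc'.2, List.filter_cons,
              if_neg (fun h => hc'.1 (eq_of_beq h).symm)])
        rw [this, hmapeq]
      · -- fresh key: A inserts the key itself, B inserts the joined rescan of ps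
        have hc' : accA.contains p.1 = false := by simpa using hc
        have hnotin : ∀ q ∈ accA.items, (q.1 == p.1) = false := by
          intro q hq
          have h := hc'
          simp only [PySem.Dict.contains, List.any_eq_false] at h
          simpa using h q hq
        have hfilp := hfil p.1 hc'
        have hfcons : (p :: suf').filter (fun r => r.1 == p.1)
            = p :: suf'.filter (fun r => r.1 == p.1) := by
          simp
        have hjoin : PySem.Str.join " | " (((ps.filter (fun q => q.1 == p.1)).map (fun q => q.2)))
            = p.2 ++ pvExt suf' p.1 := by
          rw [hfilp, hfcons]
          simp only [List.map_cons]
          rw [pvJoinCons]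
          rfl
        have hAstep : pvStepA accA p = accA.insert p.1 p.2 := by simp [pvStepA, hc']
        have hAitems : (accA.insert p.1 p.2).items = accA.items ++ [p] := by
          rw [PySem.Dict.items_insert_of_not_contains _ _ hc']
        have hBstep : name_to_code_pick ps
            (PySem.Dict.mk (accA.items.map (fun q => (q.1, q.2 ++ pvExt (p :: suf') q.1)))) p
            = PySem.Dict.mk ((accA.insert p.1 p.2).items.map
                (fun q => (q.1, q.2 ++ pvExt suf' q.1))) := by
          apply PySem.Dict.ext
          simp only [name_to_code_pick, hcont, hc']
          rw [if_neg (by simp)]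
          rw [PySem.Dict.items_insert_of_not_contains _ _ (by rw [hcont]; exact hc')]
          rw [hjoin, hAitems]
          simp only [List.map_append, List.map_cons, List.map_nil]
          congr 1
          · apply List.map_congr_left
            intro q hq
            have hps : (p.1 == q.1) = false := by
              have := hnotin q hq
              simp only [beq_eq_false_iff_ne] at this ⊢
              exact fun h => this h.symm
            simp [pvExt, hps]
        rw [hAstep, hBstep]
        exact ih (accA.insert p.1 p.2)
          (PySem.Dict.nodup_keys_insert accA p.1 p.2 hnd)
          (by
            intro c' hcc
            rw [PySem.Dict.contains_insert] at hcc
            simp only [Bool.or_eq_false_iff, beq_eq_false_iff_ne] at hcc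
            rw [hfil c' hcc.2, List.filter_cons,
              if_neg (fun h => hcc.1 (eq_of_beq h).symm)])

-- ===== VERDICT (by name: the statement is the Claim_ definition above) =====
theorem name_to_code_spec : Claim_equal_name_to_code := by
  intro spec_dict name _
  unfold Spec_name_to_code name_to_code name_to_code_alt
  rw [pvFoldA]
  have h := pvMain (name_to_code_pairs spec_dict name) (name_to_code_pairs spec_dict name)
    PySem.Dict.empty PySem.Dict.nodup_keys_empty (fun _ _ => rfl)
  simpa [PySem.Dict.empty] using h
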